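-- pv_equiv track=rewrite | github.com/bduoto/omtx-hub-online | backend/api/batch_endpoints.py | is_valid_smiles
-- ===== SOURCE A (Python) =====
-- def is_valid_smiles(smiles: str) -> bool:
--     """Validate SMILES string (basic validation)"""
--     if not smiles or not smiles.strip():
--         return False
--
--     smiles = smiles.strip()
--
--     # Basic character validation
--     valid_chars = set('ABCDEFGHIKLMNOPRSTUVWXYZabcdefghiklmnoprstuvwxyz0123456789()[]=#@+-./\\:')
--     if not all(c in valid_chars for c in smiles):
--         return False
--
--     # Check for balanced parentheses and brackets
--     if smiles.count('(') != smiles.count(')'):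
--         return False
--     if smiles.count('[') != smiles.count(']'):
--         return False
--
--     # Must contain at least one letter (element symbol)
--     if not any(c.isalpha() for c in smiles):
--         return False
--
--     # Reasonable length check
--     if len(smiles) > 300:
--         return False
--
--     return True
-- ===== SOURCE B (Python) =====
-- def is_valid_smiles(smiles: str) -> bool:
--     """Validate SMILES string (basic validation) - single pass with counters."""
--     s = smiles.strip()
--     if not s or len(s) > 300:
--         return False
--     valid = set('ABCDEFGHIKLMNOPRSTUVWXYZabcdefghiklmnoprstuvwxyz0123456789()[]=#@+-./\\:')
--     op = cp = ob = cb = 0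
--     has_alpha = False
--     for c in s:
--         if c not in valid:
--             return False
--         if c == '(':
--             op += 1
--         elif c == ')':
--             cp += 1
--         elif c == '[':
--             ob += 1
--         elif c == ']':
--             cb += 1
--         elif c.isalpha():
--             has_alpha = True
--     return op == cp and ob == cb and has_alpha
-- ===== Notes on version B (the rewrite author's own statement) =====
-- stated objective: alternative
-- what changed: Replaces A's five separate scans of the string (character validation, two count() pairs, any(isalpha), len check) by a single pass that maintains four bracket counters and a has-alpha flag, with the length check hoisted before the scan and an early return on the first invalid character.
import Mathlib
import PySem

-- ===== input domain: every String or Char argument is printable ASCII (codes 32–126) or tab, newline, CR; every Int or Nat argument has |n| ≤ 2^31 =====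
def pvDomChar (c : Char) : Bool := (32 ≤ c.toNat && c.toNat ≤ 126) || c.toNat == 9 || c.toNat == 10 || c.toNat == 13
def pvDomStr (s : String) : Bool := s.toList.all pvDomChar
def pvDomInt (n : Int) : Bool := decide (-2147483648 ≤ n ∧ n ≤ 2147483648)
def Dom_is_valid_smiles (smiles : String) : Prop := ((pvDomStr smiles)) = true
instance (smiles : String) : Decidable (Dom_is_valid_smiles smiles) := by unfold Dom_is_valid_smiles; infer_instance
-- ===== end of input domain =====

-- B replaces A's five separate scans by one pass keeping bracket counters and an alpha flag; same results.

-- ===== PORT A =====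
def pvValidCharsA : PySem.Set Char :=
  PySem.Set.ofList "ABCDEFGHIKLMNOPRSTUVWXYZabcdefghiklmnoprstuvwxyz0123456789()[]=#@+-./\\:".toList

def is_valid_smiles (smiles : String) : Bool :=
  if smiles == "" || PySem.Str.strip smiles == "" then false
  else if ¬ ((PySem.Str.strip smiles).toList.all (fun c => PySem.Set.contains pvValidCharsA c)) then false
  else if PySem.Str.count (PySem.Str.strip smiles) "(" ≠ PySem.Str.count (PySem.Str.strip smiles) ")" then false
  else if PySem.Str.count (PySem.Str.strip smiles) "[" ≠ PySem.Str.count (PySem.Str.strip smiles) "]" then false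
  else if ¬ ((PySem.Str.strip smiles).toList.any (fun c => PySem.Chars.isalpha c)) then false
  else if PySem.Str.len (PySem.Str.strip smiles) > 300 then false
  else true

-- ===== PORT B =====
def pvValidCharsB : PySem.Set Char :=
  PySem.Set.ofList "ABCDEFGHIKLMNOPRSTUVWXYZabcdefghiklmnoprstuvwxyz0123456789()[]=#@+-./\\:".toList

def pvAltLoop : List Char → Int → Int → Int → Int → Bool → Bool
  | [], op, cp, ob, cb, ha => op == cp && ob == cb && ha
  | c :: rest, op, cp, ob, cb, ha =>
    if ¬ PySem.Set.contains pvValidCharsB c then false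
    else if c == '(' then pvAltLoop rest (op + 1) cp ob cb ha
    else if c == ')' then pvAltLoop rest op (cp + 1) ob cb ha
    else if c == '[' then pvAltLoop rest op cp (ob + 1) cb ha
    else if c == ']' then pvAltLoop rest op cp ob (cb + 1) ha
    else if PySem.Chars.isalpha c then pvAltLoop rest op cp ob cb true
    else pvAltLoop rest op cp ob cb ha

def is_valid_smiles_alt (smiles : String) : Bool :=
  if (PySem.Str.strip smiles).toList.isEmpty || (PySem.Str.strip smiles).toList.length > 300 then false
  else pvAltLoop (PySem.Str.strip smiles).toList 0 0 0 0 false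

-- ===== PRECONDITION & SPEC =====
def Spec_is_valid_smiles (smiles : String) (out : Bool) : Prop := out = is_valid_smiles_alt smiles
instance (smiles : String) (out : Bool) : Decidable (Spec_is_valid_smiles smiles out) := by unfold Spec_is_valid_smiles; infer_instance

-- ===== CLAIM (what is proved, stated in full; the proofs are below) =====
def Claim_equal_is_valid_smiles : Prop := ∀ (smiles : String), Dom_is_valid_smiles smiles → Spec_is_valid_smiles smiles (is_valid_smiles smiles)

-- ===== LEMMAS AND PROOFS =====

lemma count_go_single (c : Char) : ∀ (cs : List Char) (fuel acc : Nat), cs.length ≤ fuel →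
    PySem.Chars.count.go [c] fuel cs acc = acc + cs.count c := by
  intro cs
  induction cs with
  | nil =>
    intro fuel acc _
    cases fuel <;> simp [PySem.Chars.count.go]
  | cons hd t ih =>
    intro fuel acc h
    cases fuel with
    | zero => simp at h
    | succ f =>
      simp only [List.length_cons, Nat.succ_le_succ_iff] at h
      rw [PySem.Chars.count.go]
      by_cases hc : hd = c
      · subst hc
        simp [List.isPrefixOf, ih f (acc + 1) h]
        omega
      · have hpre : [c].isPrefixOf (hd :: t) = false := by
          simp [List.isPrefixOf]
          exact fun h' => hc h'.symm
        simp [hpre, List.count_cons, (by simp [hc] : (hd == c) = false), ih f acc h]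

lemma count_single (cs : List Char) (c : Char) :
    PySem.Chars.count cs [c] = cs.count c := by
  simp [PySem.Chars.count, count_go_single c cs cs.length 0 le_rfl]

lemma altLoop_spec : ∀ (l : List Char) (op cp ob cb : Int) (ha : Bool),
    pvAltLoop l op cp ob cb ha =
      if l.all (fun c => PySem.Set.contains pvValidCharsB c) then
        ((op + (l.count '(' : Int) == cp + (l.count ')' : Int)) &&
         (ob + (l.count '[' : Int) == cb + (l.count ']' : Int)) &&
         (ha || l.any (fun c => PySem.Chars.isalpha c)))
      else false := by
  intro l
  induction l with
  | nil => intro op cp ob cb ha; simp [pvAltLoop]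
  | cons c rest ih =>
    intro op cp ob cb ha
    by_cases hv : PySem.Set.contains pvValidCharsB c = true
    · rw [pvAltLoop]
      simp only [hv, not_true, if_false, List.all_cons, List.any_cons,
        List.count_cons, Bool.true_and, beq_iff_eq]
      by_cases h1 : c = '('
      · subst h1
        rw [if_pos rfl, ih]
        simp [(by decide : PySem.Chars.isalpha '(' = false),
          show op + 1 + ((rest.count '(' : Nat) : Int) = op + (((rest.count '(' : Nat) : Int) + 1) by ring]
      · by_cases h2 : c = ')'
        · subst h2
          rw [if_neg (by decide), if_pos rfl, ih]
          simp [(by decide : PySem.Chars.isalpha ')' = false),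
            show cp + 1 + ((rest.count ')' : Nat) : Int) = cp + (((rest.count ')' : Nat) : Int) + 1) by ring]
        · by_cases h3 : c = '['
          · subst h3
            rw [if_neg (by decide), if_neg (by decide), if_pos rfl, ih]
            simp [(by decide : PySem.Chars.isalpha '[' = false),
              show ob + 1 + ((rest.count '[' : Nat) : Int) = ob + (((rest.count '[' : Nat) : Int) + 1) by ring]
          · by_cases h4 : c = ']'
            · subst h4
              rw [if_neg (by decide), if_neg (by decide), if_neg (by decide), if_pos rfl, ih]
              simp [(by decide : PySem.Chars.isalpha ']' = false),
                show cb + 1 + ((rest.count ']' : Nat) : Int) = cb + (((rest.count ']' : Nat) : Int) + 1) by ring]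
            · rw [if_neg h1, if_neg h2, if_neg h3, if_neg h4]
              by_cases h5 : PySem.Chars.isalpha c = true
              · rw [if_pos h5, ih]
                simp [h1, h2, h3, h4, h5]
              · rw [if_neg h5, ih]
                simp [h1, h2, h3, h4, Bool.eq_false_iff.mpr h5]
    · rw [pvAltLoop]
      have hcm : ¬ (c ∈ pvValidCharsB) := fun hm => hv ((PySem.Set.contains_iff _ _).mpr hm)
      simp [hcm]

-- ===== VERDICT (by name: the statement is the Claim_ definition above) =====
theorem is_valid_smiles_spec : Claim_equal_is_valid_smiles := by
  intro smiles _
  unfold Spec_is_valid_smiles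
  by_cases h0 : smiles = ""
  · subst h0; decide
  · unfold is_valid_smiles is_valid_smiles_alt
    have hb : (smiles == "") = false := by simp [h0]
    by_cases he : PySem.Str.strip smiles = ""
    · simp [hb, he]
    · have hse : (PySem.Str.strip smiles == "") = false := by simp [he]
      have hne : (PySem.Str.strip smiles).toList ≠ [] := fun hx => he (String.toList_eq_nil_iff.mp hx)
      have hc1 : PySem.Str.count (PySem.Str.strip smiles) "(" = (PySem.Str.strip smiles).toList.count '(' := by
        rw [PySem.Str.count_eq]; exact count_single _ '('
      have hc2 : PySem.Str.count (PySem.Str.strip smiles) ")" = (PySem.Str.strip smiles).toList.count ')' := by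
        rw [PySem.Str.count_eq]; exact count_single _ ')'
      have hc3 : PySem.Str.count (PySem.Str.strip smiles) "[" = (PySem.Str.strip smiles).toList.count '[' := by
        rw [PySem.Str.count_eq]; exact count_single _ '['
      have hc4 : PySem.Str.count (PySem.Str.strip smiles) "]" = (PySem.Str.strip smiles).toList.count ']' := by
        rw [PySem.Str.count_eq]; exact count_single _ ']'
      have hlen : PySem.Str.len (PySem.Str.strip smiles) = ((PySem.Str.strip smiles).toList.length : Int) := by
        rw [PySem.Str.len_eq]
      have hAB : pvValidCharsA = pvValidCharsB := rfl
      rw [altLoop_spec, hc1, hc2, hc3, hc4, hlen, hAB]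
      simp only [hb, hse, Bool.or_self, Bool.false_or]
      generalize (PySem.Str.strip smiles).toList = l at hne
      have hle : l.isEmpty = false := by
        cases hq : l
        · exact absurd hq hne
        · rfl
      rw [hle]
      simp only [Bool.false_or]
      split_ifs with hA1 hA2 hA3 hA4 hA5 h300
      all_goals simp_all
      all_goals omega
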